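-- pv_equiv track=rewrite | github.com/spearStr/Coding-hub | week2/Ariling/prgs-110 옮기기/main.py | solution
-- ===== SOURCE A (Python) =====
-- def solution(s):
--     answer = []
--     for x in s:
--         # 모든 110 찾기
--         # 110 찾으면 변형된 x에서 또 찾기
--         cnt = 0
--         stack = []
--         for x_one in x:
--             if x_one == '1':
--                 stack.append(x_one)
--             else:
--                 if len(stack) >= 2 and stack[-1] == '1' and stack[-2] == '1':
--                     stack.pop()
--                     stack.pop()
--                     cnt += 1
--                 else:
--                     stack.append(x_one)
--         x = ''.join(stack)
--         # 뒤에서부터 체크해서 0이 나오면 그 0 뒤에 모든 110 붙이기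
--         # 0 없으면 나머지가 전부 1로 구성되어 있으므로 모든 110을 앞에 붙이기
--         for i in range(len(x) - 1, -1, -1):
--             if x[i] == '0':
--                 answer.append(x[:i + 1] + ('110' * cnt) + x[i + 1:])
--                 break
--         else:
--             answer.append('110' * cnt + x)
--
--     return answer
-- ===== SOURCE B (Python) =====
-- def solution(s):
--     answer = []
--     for x in s:
--         # Repeatedly delete the leftmost "11"+non-'1' triple until none remains,
--         # counting deletions; confluence of this overlap-free rewrite makes the
--         # result equal to the single stack pass.
--         cnt = 0
--         while True:
--             i = _find_triple(x)
--             if i == -1: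
--                 break
--             x = x[:i] + x[i + 3:]
--             cnt += 1
--         idx = x.rfind('0')
--         if idx == -1:
--             answer.append('110' * cnt + x)
--         else:
--             answer.append(x[:idx + 1] + '110' * cnt + x[idx + 1:])
--     return answer
--
--
-- def _find_triple(x):
--     for i in range(len(x) - 2):
--         if x[i] == '1' and x[i + 1] == '1' and x[i + 2] != '1':
--             return i
--     return -1
-- ===== Notes on version B (the rewrite author's own statement) =====
-- stated objective: alternative
-- what changed: Replaces A's single linear stack pass with repeated deletion of the leftmost "11"+non-'1' triple until none remains (counting deletions), and replaces A's explicit backwards index loop with str.rfind('0'); on typical inputs with few triples B does cheap slice scans instead of per-char Python list operations.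
import Mathlib
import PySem

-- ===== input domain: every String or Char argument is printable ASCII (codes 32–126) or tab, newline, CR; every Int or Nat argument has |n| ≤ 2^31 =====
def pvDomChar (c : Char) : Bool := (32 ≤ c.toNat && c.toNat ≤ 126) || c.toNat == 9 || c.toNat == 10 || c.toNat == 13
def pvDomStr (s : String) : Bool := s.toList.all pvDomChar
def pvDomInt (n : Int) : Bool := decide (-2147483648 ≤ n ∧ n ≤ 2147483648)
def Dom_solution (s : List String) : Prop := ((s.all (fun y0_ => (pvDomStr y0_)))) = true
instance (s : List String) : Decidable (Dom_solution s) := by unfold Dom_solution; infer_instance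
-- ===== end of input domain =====

-- B replaces A's single stack pass by repeated deletion of the leftmost "11"+non-'1'
-- triple and uses rfind('0') for reinsertion; alternative decomposition, same results.

-- ===== PORT A =====
-- '110' * cnt (used by both sources)
def rep110 (cnt : Nat) : List Char := (List.replicate cnt ['1','1','0']).flatten

-- the inner for-loop body; the Python stack (append/pop at the right end) is kept head-as-top
def solStep (p : List Char × Nat) (c : Char) : List Char × Nat :=
  if c = '1' then (c :: p.1, p.2)
  else match p.1 with
    | a :: b :: rest => if a = '1' ∧ b = '1' then (rest, p.2 + 1) else (c :: p.1, p.2)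
    | _ => (c :: p.1, p.2)

-- the 'for i in range(len(x)-1, -1, -1)' search for '0' (argument = index+1, counts down)
def solFindDown (x : List Char) : Nat → Option Nat
  | 0 => none
  | i + 1 => if x[i]? = some '0' then some i else solFindDown x i

def solOne (x : List Char) : List Char :=
  let p := x.foldl solStep ([], 0)
  let y := p.1.reverse
  match solFindDown y y.length with
  | some i => y.take (i + 1) ++ rep110 p.2 ++ y.drop (i + 1)
  | none => rep110 p.2 ++ y

def solution (s : List String) : List String :=
  s.foldl (fun answer x => answer ++ [String.ofList (solOne x.toList)]) []

-- ===== PORT B =====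
-- _find_triple: leftmost i with x[i]='1', x[i+1]='1', x[i+2]≠'1'
def altFind : List Char → Option Nat
  | a :: b :: c :: rest =>
      if a = '1' ∧ b = '1' ∧ c ≠ '1' then some 0
      else (altFind (b :: c :: rest)).map (· + 1)
  | _ => none

theorem altFind_le (x : List Char) : ∀ (i : Nat), altFind x = some i → i + 3 ≤ x.length := by
  match x with
  | [] => simp [altFind]
  | [a] => simp [altFind]
  | [a, b] => simp [altFind]
  | a :: b :: c :: rest =>
      intro i hi
      rw [altFind] at hi
      split at hi
      · simp only [Option.some.injEq] at hi
        simp [← hi]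
      · simp only [Option.map_eq_some_iff] at hi
        obtain ⟨j, hj, rfl⟩ := hi
        have := altFind_le (b :: c :: rest) j hj
        simp at this ⊢
        omega
termination_by x.length

-- the 'while True' deletion loop
def altLoop (x : List Char) (cnt : Nat) : List Char × Nat :=
  match h : altFind x with
  | some i => altLoop (x.take i ++ x.drop (i + 3)) (cnt + 1)
  | none => (x, cnt)
termination_by x.length
decreasing_by
  have := altFind_le x i h
  simp [List.length_take, List.length_drop]
  omega

-- x.rfind('0') : scan the reversed list, convert the position back to a left index
def altRfindAux : List Char → Option Nat
  | [] => none
  | c :: t => if c = '0' then some 0 else (altRfindAux t).map (· + 1)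

def altRfind (x : List Char) : Option Nat :=
  (altRfindAux x.reverse).map (fun j => x.length - 1 - j)

def altOne (x : List Char) : List Char :=
  let p := altLoop x 0
  match altRfind p.1 with
  | some idx => p.1.take (idx + 1) ++ rep110 p.2 ++ p.1.drop (idx + 1)
  | none => rep110 p.2 ++ p.1

def solution_alt (s : List String) : List String :=
  s.foldl (fun answer x => answer ++ [String.ofList (altOne x.toList)]) []

-- ===== PRECONDITION & SPEC =====
def Spec_solution (s : List String) (out : List String) : Prop := out = solution_alt s
instance (s : List String) (out : List String) : Decidable (Spec_solution s out) := by unfold Spec_solution; infer_instance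

-- ===== CLAIM (what is proved, stated in full; the proofs are below) =====
def Claim_equal_solution : Prop := ∀ (s : List String), Dom_solution s → Spec_solution s (solution s)

-- ===== LEMMAS AND PROOFS =====

-- the count is a pure accumulator: an initial offset passes through the fold
theorem solStep_offset (p : List Char × Nat) (k : Nat) (c : Char) :
    solStep (p.1, p.2 + k) c = ((solStep p c).1, (solStep p c).2 + k) := by
  rcases p with ⟨st, n⟩
  by_cases h : c = '1'
  · simp [solStep, h]
  · simp only [solStep, if_neg h]
    cases st with
    | nil => rfl
    | cons a t =>
        cases t with
        | nil => rfl
        | cons b rest =>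
            by_cases hab : a = '1' ∧ b = '1'
            · simp only [if_pos hab]
              simp [Nat.add_right_comm]
            · simp only [if_neg hab]

theorem foldl_offset (v : List Char) : ∀ (st : List Char) (n k : Nat),
    v.foldl solStep (st, n + k) =
      ((v.foldl solStep (st, n)).1, (v.foldl solStep (st, n)).2 + k) := by
  induction v with
  | nil => intro st n k; simp
  | cons c v ih =>
      intro st n k
      simp only [List.foldl_cons]
      rw [show ((st, n + k) : List Char × Nat) = ((st, n).1, (st, n).2 + k) by rfl,
        solStep_offset, ← Prod.mk.eta (p := solStep (st, n) c), ih]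

-- processing "11c" (c ≠ '1') from any state returns to the same stack, count + 1
theorem foldl_triple (st : List Char) (n : Nat) (c : Char) (hc : c ≠ '1') (v : List Char) :
    ('1' :: '1' :: c :: v).foldl solStep (st, n) = v.foldl solStep (st, n + 1) := by
  simp only [List.foldl_cons]
  simp [solStep, hc]

-- if the whole string has a match, altFind finds one
theorem altFind_tail (d : Char) (t : List Char) (h : altFind (d :: t) = none) :
    altFind t = none := by
  match t with
  | [] => simp [altFind]
  | [a] => simp [altFind]
  | a :: b :: r =>
      simp only [altFind] at h
      split at h
      · exact absurd h (by simp)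
      · simpa using h

theorem altFind_exists (u : List Char) (c : Char) (hc : c ≠ '1') (v : List Char) :
    altFind (u ++ '1' :: '1' :: c :: v) ≠ none := by
  induction u with
  | nil => simp [altFind, hc]
  | cons d u ih =>
      intro h
      exact ih (altFind_tail _ _ h)

-- with no match anywhere, the stack pass just copies the string
theorem foldl_noMatch (x : List Char) : ∀ (st : List Char) (n : Nat),
    altFind (st.reverse ++ x) = none → x.foldl solStep (st, n) = (x.reverse ++ st, n) := by
  induction x with
  | nil => intro st n h; simp
  | cons c xs ih =>
      intro st n h
      by_cases hc : c = '1'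
      · subst hc
        have h1 : solStep (st, n) '1' = ('1' :: st, n) := by simp [solStep]
        rw [List.foldl_cons, h1, ih ('1' :: st) n (by simpa using h)]
        simp
      · simp only [List.foldl_cons]
        have hpush : solStep (st, n) c = (c :: st, n) := by
          unfold solStep
          rw [if_neg hc]
          match st with
          | [] => rfl
          | [a] => rfl
          | a :: b :: rest =>
              simp only
              rw [if_neg]
              intro ⟨ha, hb⟩
              subst ha; subst hb
              exact altFind_exists rest.reverse c hc xs (by simpa using h)
        rw [hpush, ih (c :: st) n (by simpa using h)]
        simp

-- a successful altFind decomposes the string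
theorem altFind_spec (x : List Char) : ∀ (i : Nat), altFind x = some i →
    ∃ u c v, u.length = i ∧ c ≠ '1' ∧ x = u ++ '1' :: '1' :: c :: v := by
  match x with
  | [] => simp [altFind]
  | [a] => simp [altFind]
  | [a, b] => simp [altFind]
  | a :: b :: c :: rest =>
      intro i hi
      rw [altFind] at hi
      split at hi
      · rename_i hcond
        simp only [Option.some.injEq] at hi
        obtain ⟨ha, hb, hc⟩ := hcond
        exact ⟨[], c, rest, by simp [← hi], hc, by simp [ha, hb]⟩
      · simp only [Option.map_eq_some_iff] at hi
        obtain ⟨j, hj, rfl⟩ := hi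
        obtain ⟨u, c', v, hu, hc', he⟩ := altFind_spec (b :: c :: rest) j hj
        exact ⟨a :: u, c', v, by simp [hu], hc', by simp [he]⟩
termination_by x.length

-- the deletion loop computes exactly A's collapsed stack and count
theorem altLoop_eq (x : List Char) (cnt : Nat) :
    altLoop x cnt = ((x.foldl solStep ([], 0)).1.reverse, cnt + (x.foldl solStep ([], 0)).2) := by
  induction x, cnt using altLoop.induct with
  | case1 x cnt i h ih =>
      rw [altLoop]
      split
      case h_2 heq => rw [h] at heq; cases heq
      case h_1 i' heq =>
      rw [h] at heq
      injection heq with heq'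
      subst heq'
      obtain ⟨u, c, v, hu, hc, he⟩ := altFind_spec x i h
      subst he
      have htake : (u ++ '1' :: '1' :: c :: v).take i = u := by
        rw [← hu]; simp
      have hdrop : (u ++ '1' :: '1' :: c :: v).drop (i + 3) = v := by
        rw [← hu]; simp
      rw [htake, hdrop] at ih ⊢
      rw [ih]
      have hfold : (u ++ '1' :: '1' :: c :: v).foldl solStep ([], 0)
          = (((u ++ v).foldl solStep ([], 0)).1, ((u ++ v).foldl solStep ([], 0)).2 + 1) := by
        rw [List.foldl_append, List.foldl_append]
        rw [← Prod.mk.eta (p := u.foldl solStep ([], 0))]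
        rw [foldl_triple _ _ _ hc, foldl_offset]
      rw [hfold]
      simp [Nat.add_comm, Nat.add_assoc]
  | case2 x cnt h =>
      rw [altLoop]
      split
      case h_1 i' heq => rw [h] at heq; cases heq
      case h_2 heq =>
      have := foldl_noMatch x [] 0 (by simpa using h)
      simp [this]

-- the backwards index loop is rfind
theorem findDown_eq (x : List Char) : ∀ (i : Nat), i ≤ x.length →
    solFindDown x i = (altRfindAux (x.take i).reverse).map (fun j => i - 1 - j) := by
  intro i
  induction i with
  | zero => intro _; simp [solFindDown, altRfindAux]
  | succ i ih =>
      intro hle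
      have hi : i < x.length := by omega
      have hget : x[i]? = some x[i] := List.getElem?_eq_getElem hi
      have htake : (x.take (i + 1)).reverse = x[i] :: (x.take i).reverse := by
        rw [List.take_add_one, hget]
        simp
      rw [htake]
      simp only [solFindDown, altRfindAux]
      by_cases h0 : x[i] = '0'
      · simp [h0, hget]
      · have : x[i]? ≠ some '0' := by simp [hget, h0]
        rw [if_neg this, if_neg h0, ih (by omega)]
        cases altRfindAux (x.take i).reverse with
        | none => simp
        | some j =>
            simp only [Option.map_some, Option.some.injEq]
            omega

theorem one_eq (x : List Char) : solOne x = altOne x := by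
  unfold solOne altOne
  rw [altLoop_eq]
  simp only [Nat.zero_add]
  set p := x.foldl solStep ([], 0) with hp
  have hlen : p.1.reverse.length = p.1.reverse.length := rfl
  rw [findDown_eq p.1.reverse p.1.reverse.length (le_refl _)]
  unfold altRfind
  rw [List.take_length]

-- ===== VERDICT (by name: the statement is the Claim_ definition above) =====
theorem solution_spec : Claim_equal_solution := by
  unfold Claim_equal_solution
  intro s _
  unfold Spec_solution solution solution_alt
  simp only [one_eq]
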